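-- pv_equiv track=rewrite | github.com/FtKuBo/sudoku | sudok.py | chiffrebloc
-- ===== SOURCE A (Python) =====
-- def chiffrebloc(i,y,puzzle):
--
--     chiffre_bloc=[]
--
--     if 0 <= i < 3:
--         if 0 <= y < 3:
--             for w in range(3):
--                 chiffre_bloc+=puzzle[w][:3]
--         if 3 <= y < 6:
--             for w in range(3,6):
--                 chiffre_bloc+=puzzle[w][:3]
--         if 6 <= y < 9:
--             for w in range(6,9):
--                 chiffre_bloc+=puzzle[w][:3]
--
--     if 3 <= i < 6:
--         if 0 <= y < 3:
--             for w in range(3):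
--                 chiffre_bloc+=puzzle[w][3:6]
--         if 3 <= y < 6:
--             for w in range(3,6):
--                 chiffre_bloc+=puzzle[w][3:6]
--         if 6 <= y < 9:
--             for w in range(6,9):
--                 chiffre_bloc+=puzzle[w][3:6]
--
--     if 6 <= i < 9:
--         if 0 <= y < 3:
--             for w in range(3):
--                 chiffre_bloc+=puzzle[w][6:9]
--         if 3 <= y < 6:
--             for w in range(3,6):
--                 chiffre_bloc+=puzzle[w][6:9]
--         if 6 <= y < 9:
--             for w in range(6,9):
--                 chiffre_bloc+=puzzle[w][6:9]
--
--
--     while 0 in chiffre_bloc: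
--         chiffre_bloc.remove(0)
--
--     return chiffre_bloc
-- ===== SOURCE B (Python) =====
-- def chiffrebloc(i, y, puzzle):
--     if not (0 <= i < 9 and 0 <= y < 9):
--         return []
--     c = (i // 3) * 3
--     r = (y // 3) * 3
--     return [v for w in range(r, r + 3) for v in puzzle[w][c:c + 3] if v != 0]
-- ===== Notes on version B (the rewrite author's own statement) =====
-- stated objective: simpler
-- what changed: Replaces the nine hand-written block branches plus a while/remove zero-deletion loop by arithmetic offset computation (r=(y//3)*3, c=(i//3)*3) and a single filtering comprehension over the three block rows.
import Mathlib
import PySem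

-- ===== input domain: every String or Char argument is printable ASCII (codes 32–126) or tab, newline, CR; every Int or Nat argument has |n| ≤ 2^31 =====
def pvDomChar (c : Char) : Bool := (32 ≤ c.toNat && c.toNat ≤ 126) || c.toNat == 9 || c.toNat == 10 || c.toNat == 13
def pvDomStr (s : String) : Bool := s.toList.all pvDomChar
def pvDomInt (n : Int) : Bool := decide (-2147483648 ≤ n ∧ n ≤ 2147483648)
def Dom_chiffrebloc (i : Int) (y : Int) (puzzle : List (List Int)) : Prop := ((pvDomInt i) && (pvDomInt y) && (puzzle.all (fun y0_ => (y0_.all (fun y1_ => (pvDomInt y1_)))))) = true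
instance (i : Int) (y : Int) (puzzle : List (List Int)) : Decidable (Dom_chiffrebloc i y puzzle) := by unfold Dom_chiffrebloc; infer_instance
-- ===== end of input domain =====

-- B replaces A's nine hand-written block branches and while/remove zero-deletion loop
-- by computed block offsets and one filtering comprehension (objective: simpler).

-- ===== PORT A =====
-- for w in range(lo,hi): chiffre_bloc += puzzle[w][s:e]
def pvLoop (lo hi : Int) (s e : Option Int) (puzzle : List (List Int)) (acc : List Int) : List Int :=
  (PySem.List.pyRange lo hi 1).foldl
    (fun cb w => cb ++ PySem.List.slice ((PySem.List.pyGet? puzzle w).getD []) s e) acc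

-- the three y-interval ifs inside one i-interval branch (column slice s:e fixed)
def pvYcases (y : Int) (s e : Option Int) (puzzle : List (List Int)) (cb : List Int) : List Int :=
  let cb := if 0 ≤ y ∧ y < 3 then pvLoop 0 3 s e puzzle cb else cb
  let cb := if 3 ≤ y ∧ y < 6 then pvLoop 3 6 s e puzzle cb else cb
  if 6 ≤ y ∧ y < 9 then pvLoop 6 9 s e puzzle cb else cb

-- 'while 0 in chiffre_bloc: chiffre_bloc.remove(0)'
def pvRemoveZeros (l : List Int) : List Int :=
  if h : (0 : Int) ∈ l then pvRemoveZeros ((PySem.List.remove? l 0).getD l) else l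
termination_by l.length
decreasing_by
  rw [PySem.List.remove?_eq_some_erase l 0 h, Option.getD_some]
  rw [List.length_erase_of_mem h]
  have := List.length_pos_of_mem h
  omega

def chiffrebloc (i : Int) (y : Int) (puzzle : List (List Int)) : List Int :=
  let cb : List Int := []
  let cb := if 0 ≤ i ∧ i < 3 then pvYcases y none (some 3) puzzle cb else cb
  let cb := if 3 ≤ i ∧ i < 6 then pvYcases y (some 3) (some 6) puzzle cb else cb
  let cb := if 6 ≤ i ∧ i < 9 then pvYcases y (some 6) (some 9) puzzle cb else cb
  pvRemoveZeros cb

-- ===== PORT B =====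
def chiffrebloc_alt (i : Int) (y : Int) (puzzle : List (List Int)) : List Int :=
  if 0 ≤ i ∧ i < 9 ∧ 0 ≤ y ∧ y < 9 then
    let c := PySem.Int.floordiv i 3 * 3
    let r := PySem.Int.floordiv y 3 * 3
    (PySem.List.pyRange r (r + 3) 1).flatMap
      (fun w => (PySem.List.slice ((PySem.List.pyGet? puzzle w).getD []) (some c) (some (c + 3))).filter
        (fun v => v != 0))
  else []

-- ===== PRECONDITION & SPEC =====
-- Pre_ excludes exactly the inputs where A (and B) raise IndexError: i in [0,9) and y
-- in one of the block-row bands [0,3), [3,6), [6,9), but puzzle has fewer rows than that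
-- band's last row needs (3, 6 or 9 rows respectively).
def Pre_chiffrebloc (i : Int) (y : Int) (puzzle : List (List Int)) : Prop :=
  (0 ≤ i ∧ i < 9) →
    (0 ≤ y ∧ y < 3 → 3 ≤ (puzzle.length : Int)) ∧
    (3 ≤ y ∧ y < 6 → 6 ≤ (puzzle.length : Int)) ∧
    (6 ≤ y ∧ y < 9 → 9 ≤ (puzzle.length : Int))
instance (i : Int) (y : Int) (puzzle : List (List Int)) : Decidable (Pre_chiffrebloc i y puzzle) := by
  unfold Pre_chiffrebloc; infer_instance

def pvWitness_chiffrebloc : Int × Int × List (List Int) :=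
  (4, 1, [[1,0,2],[0,5,0],[7,8,9],[0,0,1],[2,0,3],[4,5,0],[0,6,0],[7,0,8],[9,0,0]])

def Spec_chiffrebloc (i : Int) (y : Int) (puzzle : List (List Int)) (out : List Int) : Prop :=
  out = chiffrebloc_alt i y puzzle
instance (i : Int) (y : Int) (puzzle : List (List Int)) (out : List Int) : Decidable (Spec_chiffrebloc i y puzzle out) := by
  unfold Spec_chiffrebloc; infer_instance

-- ===== CLAIM (what is proved, stated in full; the proofs are below) =====
def Claim_equal_chiffrebloc : Prop := ∀ (i : Int) (y : Int) (puzzle : List (List Int)),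
  Dom_chiffrebloc i y puzzle → Pre_chiffrebloc i y puzzle →
  Spec_chiffrebloc i y puzzle (chiffrebloc i y puzzle)

-- ===== LEMMAS AND PROOFS =====

theorem filter_erase_zero (l : List Int) :
    (l.erase 0).filter (fun v => v != 0) = l.filter (fun v => v != 0) := by
  induction l with
  | nil => simp
  | cons x xs ih =>
    by_cases hx : x = 0
    · subst hx; simp
    · simp [hx, ih]

theorem pvRemoveZeros_eq_filter (l : List Int) : pvRemoveZeros l = l.filter (fun v => v != 0) := by
  fun_induction pvRemoveZeros l with
  | case1 l h ih =>
    rw [PySem.List.remove?_eq_some_erase l 0 h, Option.getD_some] at ih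
    rw [PySem.List.remove?_eq_some_erase l 0 h, Option.getD_some, ih, filter_erase_zero]
  | case2 l h =>
    symm
    refine List.filter_eq_self.mpr ?_
    intro v hv
    simp only [bne_iff_ne, ne_eq]
    rintro rfl
    exact h hv

theorem pvRemoveZeros_nil : pvRemoveZeros [] = [] := by
  rw [pvRemoveZeros]; simp

theorem block_eq (puzzle : List (List Int)) (n : Nat) (s e : Option Int) (c : Int)
    (hse : ∀ row : List Int, PySem.List.slice row s e = PySem.List.slice row (some c) (some (c + 3))) :
    pvRemoveZeros (pvLoop (n : Int) ((n : Int) + 3) s e puzzle []) =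
      (PySem.List.pyRange (n : Int) ((n : Int) + 3) 1).flatMap
        (fun w => (PySem.List.slice ((PySem.List.pyGet? puzzle w).getD []) (some c) (some (c + 3))).filter
          (fun v => v != 0)) := by
  have hr : PySem.List.pyRange (n : Int) ((n : Int) + 3) 1 = [(n : Int), (n : Int) + 1, (n : Int) + 2] := by
    rw [PySem.List.pyRange_one]
    have h3 : ((n : Int) + 3 - (n : Int)).toNat = 3 := by omega
    rw [h3]
    norm_num [List.range_succ]
  simp only [pvLoop, hr, List.foldl_cons, List.foldl_nil, List.nil_append,
    pvRemoveZeros_eq_filter, List.filter_append, List.flatMap_cons, List.flatMap_nil,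
    List.append_nil, List.append_assoc, hse]

set_option maxHeartbeats 1000000 in
theorem case_lemma (i y : Int) (puzzle : List (List Int)) (j k : Nat)
    (hj : j < 3) (hk : k < 3)
    (hi : (3 * j : Int) ≤ i ∧ i < 3 * j + 3) (hy : (3 * k : Int) ≤ y ∧ y < 3 * k + 3) :
    chiffrebloc i y puzzle = chiffrebloc_alt i y puzzle := by
  have hfi : PySem.Int.floordiv i 3 = (j : Int) := by
    rw [PySem.Int.floordiv_eq_iff_of_pos (by omega)]
    omega
  have hfy : PySem.Int.floordiv y 3 = (k : Int) := by
    rw [PySem.Int.floordiv_eq_iff_of_pos (by omega)]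
    omega
  have hse0 : ∀ row : List Int, PySem.List.slice row none (some 3)
      = PySem.List.slice row (some ((0:Int))) (some ((0:Int) + 3)) := by
    intro row; norm_num
  interval_cases j <;> interval_cases k <;>
    (push_cast at hfi hfy hi hy
     simp only [chiffrebloc, chiffrebloc_alt, pvYcases, hfi, hfy]
     split_ifs <;> try omega
     first
       | simpa using block_eq puzzle 0 none (some 3) 0 hse0
       | simpa using block_eq puzzle 3 none (some 3) 0 hse0
       | simpa using block_eq puzzle 6 none (some 3) 0 hse0
       | simpa using block_eq puzzle 0 (some 3) (some 6) 3 (by norm_num)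
       | simpa using block_eq puzzle 3 (some 3) (some 6) 3 (by norm_num)
       | simpa using block_eq puzzle 6 (some 3) (some 6) 3 (by norm_num)
       | simpa using block_eq puzzle 0 (some 6) (some 9) 6 (by norm_num)
       | simpa using block_eq puzzle 3 (some 6) (some 9) 6 (by norm_num)
       | simpa using block_eq puzzle 6 (some 6) (some 9) 6 (by norm_num))

-- ===== VERDICT (by name: the statement is the Claim_ definition above) =====
set_option maxHeartbeats 1000000 in
theorem chiffrebloc_spec : Claim_equal_chiffrebloc := by
  intro i y puzzle _ _
  unfold Spec_chiffrebloc
  by_cases hin : 0 ≤ i ∧ i < 9 ∧ 0 ≤ y ∧ y < 9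
  · obtain ⟨hi9, hi9', hy9, hy9'⟩ := hin
    have hi3 : (0 ≤ i ∧ i < 3) ∨ (3 ≤ i ∧ i < 6) ∨ (6 ≤ i ∧ i < 9) := by omega
    have hy3 : (0 ≤ y ∧ y < 3) ∨ (3 ≤ y ∧ y < 6) ∨ (6 ≤ y ∧ y < 9) := by omega
    rcases hi3 with hi | hi | hi <;> rcases hy3 with hy | hy | hy
    · exact case_lemma i y puzzle 0 0 (by omega) (by omega) (by push_cast; omega) (by push_cast; omega)
    · exact case_lemma i y puzzle 0 1 (by omega) (by omega) (by push_cast; omega) (by push_cast; omega)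
    · exact case_lemma i y puzzle 0 2 (by omega) (by omega) (by push_cast; omega) (by push_cast; omega)
    · exact case_lemma i y puzzle 1 0 (by omega) (by omega) (by push_cast; omega) (by push_cast; omega)
    · exact case_lemma i y puzzle 1 1 (by omega) (by omega) (by push_cast; omega) (by push_cast; omega)
    · exact case_lemma i y puzzle 1 2 (by omega) (by omega) (by push_cast; omega) (by push_cast; omega)
    · exact case_lemma i y puzzle 2 0 (by omega) (by omega) (by push_cast; omega) (by push_cast; omega)
    · exact case_lemma i y puzzle 2 1 (by omega) (by omega) (by push_cast; omega) (by push_cast; omega)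
    · exact case_lemma i y puzzle 2 2 (by omega) (by omega) (by push_cast; omega) (by push_cast; omega)
  · have hA : chiffrebloc i y puzzle = pvRemoveZeros [] := by
      simp only [chiffrebloc, pvYcases]
      split_ifs <;> first | omega | rfl
    rw [hA, pvRemoveZeros_nil]
    simp only [chiffrebloc_alt]
    rw [if_neg hin]
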